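-- pv_equiv track=rewrite | github.com/ARoennau/test-aoc-repo | python/27.py | calculate_difference
-- ===== SOURCE A (Python) =====
-- from typing import Dict, List, Tuple
--
-- def calculate_difference(counts: Dict[str, int]) -> int:
--     min = list(counts.keys())[0]
--     max = list(counts.keys())[0]
--     for key in counts.keys():
--         if counts[key] < counts[min]:
--             min = key
--         if counts[key] > counts[max]:
--             max = key
--
--     return counts[max] - counts[min]
-- ===== SOURCE B (Python) =====
-- def calculate_difference(counts):
--     s = sorted(counts.values())
--     return s[-1] - s[0]
-- ===== Notes on version B (the rewrite author's own statement) =====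
-- stated objective: simpler
-- what changed: Replaced the single-pass scan that tracks the min and max KEYS (with a dict lookup per comparison) by sorting the values once and reading the extremes off the two ends of the sorted list.
import Mathlib
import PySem

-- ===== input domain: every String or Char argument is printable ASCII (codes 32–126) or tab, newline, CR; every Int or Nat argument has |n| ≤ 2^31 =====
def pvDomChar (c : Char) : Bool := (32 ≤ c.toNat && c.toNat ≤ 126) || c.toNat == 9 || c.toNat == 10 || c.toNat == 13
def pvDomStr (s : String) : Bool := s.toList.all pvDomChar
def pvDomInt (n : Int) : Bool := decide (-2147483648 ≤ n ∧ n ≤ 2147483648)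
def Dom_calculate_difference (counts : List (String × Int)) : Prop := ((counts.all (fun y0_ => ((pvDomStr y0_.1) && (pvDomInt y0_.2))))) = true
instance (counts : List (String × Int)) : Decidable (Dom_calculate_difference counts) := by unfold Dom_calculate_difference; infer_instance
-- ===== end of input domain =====

-- B replaces A's single-pass min/max-key scan by sorting the dict's values once and
-- subtracting the first from the last element of the sorted list (objective: simpler).


-- ===== PORT A =====
def calculate_difference (counts : List (String × Int)) : Int :=
  let d := PySem.Dict.mk counts
  match d.keys with
  | [] => 0  -- list(counts.keys())[0] raises IndexError on an empty dict; excluded by Pre_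
  | k0 :: _ =>
    -- min = max = first key; for key in counts.keys(): two independent ifs update min / max
    let st := d.keys.foldl (fun (s : String × String) key =>
      (if d.getD key 0 < d.getD s.1 0 then key else s.1,
       if d.getD key 0 > d.getD s.2 0 then key else s.2)) (k0, k0)
    -- counts[key] never raises here (every looked-up key is in the dict), so getD 0 is exact
    d.getD st.2 0 - d.getD st.1 0

-- ===== PORT B =====
def calculate_difference_alt (counts : List (String × Int)) : Int :=
  let s := PySem.List.sorted (PySem.Dict.mk counts).values (fun x => x)
  match PySem.List.pyGet? s (-1), PySem.List.pyGet? s 0 with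
  | some a, some b => a - b
  | _, _ => 0  -- s[-1] raises IndexError on an empty dict; excluded by Pre_

-- ===== PRECONDITION & SPEC =====
-- Pre_ excludes the empty dict (both Pythons raise IndexError there) and association
-- lists with duplicate keys, which do not represent a Python dict (the declared argument type).
def Pre_calculate_difference (counts : List (String × Int)) : Prop :=
  counts ≠ [] ∧ (counts.map Prod.fst).Nodup
instance (counts : List (String × Int)) : Decidable (Pre_calculate_difference counts) := by
  unfold Pre_calculate_difference; infer_instance

def pvWitness_calculate_difference : (List (String × Int)) := [("a", 1), ("b", 3)]

def Spec_calculate_difference (counts : List (String × Int)) (out : Int) : Prop := out = calculate_difference_alt counts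
instance (counts : List (String × Int)) (out : Int) : Decidable (Spec_calculate_difference counts out) := by unfold Spec_calculate_difference; infer_instance

-- ===== CLAIM (what is proved, stated in full; the proofs are below) =====
def Claim_equal_calculate_difference : Prop := ∀ (counts : List (String × Int)), Dom_calculate_difference counts → Pre_calculate_difference counts → Spec_calculate_difference counts (calculate_difference counts)

-- ===== LEMMAS AND PROOFS =====
theorem fold_minmax (v : String → Int) (l : List String) (a b : String) :
    v ((l.foldl (fun (s : String × String) key =>
        (if v key < v s.1 then key else s.1,
         if v key > v s.2 then key else s.2)) (a, b)).1)
      = (l.map v).foldl min (v a)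
    ∧ v ((l.foldl (fun (s : String × String) key =>
        (if v key < v s.1 then key else s.1,
         if v key > v s.2 then key else s.2)) (a, b)).2)
      = (l.map v).foldl max (v b) := by
  induction l generalizing a b with
  | nil => exact ⟨rfl, rfl⟩
  | cons k t ih =>
    simp only [List.foldl_cons, List.map_cons]
    have h1 : v (if v k < v a then k else a) = min (v a) (v k) := by
      split_ifs with h <;> omega
    have h2 : v (if v k > v b then k else b) = max (v b) (v k) := by
      split_ifs with h <;> omega
    have := ih (if v k < v a then k else a) (if v k > v b then k else b)
    rw [h1, h2] at this
    exact this

theorem pyGet_neg_one (xs : List Int) (h : xs ≠ []) : PySem.List.pyGet? xs (-1) = some (xs.getLast h) := by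
  have hl : 0 < xs.length := List.length_pos_iff.mpr h
  simp only [PySem.List.pyGet?, PySem.List.pyIdx?]
  norm_num [hl]
  rw [if_pos (by omega : 1 ≤ xs.length)]
  simp [List.getLast_eq_getElem, hl]

theorem pyGet_zero (xs : List Int) (h : xs ≠ []) : PySem.List.pyGet? xs 0 = some (xs.head h) := by
  have hl : 0 < xs.length := List.length_pos_iff.mpr h
  simp [PySem.List.pyGet?, PySem.List.pyIdx?, hl, List.head_eq_getElem]


theorem main_eq (counts : List (String × Int)) (hne : counts ≠ [])
    (hnd : (counts.map Prod.fst).Nodup) :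
    calculate_difference counts = calculate_difference_alt counts := by
  have hkeys : (PySem.Dict.mk counts).keys = counts.map Prod.fst := by simp [PySem.Dict.keys]
  have hknd : (PySem.Dict.mk counts).keys.Nodup := by rw [hkeys]; exact hnd
  have hkne : (PySem.Dict.mk counts).keys ≠ [] := by rw [hkeys]; simp [hne]
  obtain ⟨k0, rest, hk⟩ := List.exists_cons_of_ne_nil hkne
  set v : String → Int := fun k => (PySem.Dict.mk counts).getD k 0 with hv
  have hvals : (PySem.Dict.mk counts).values = v k0 :: rest.map v := by
    rw [PySem.Dict.values_eq_map_keys _ hknd 0, hk, List.map_cons]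
  have hvne : (PySem.Dict.mk counts).values ≠ [] := by rw [hvals]; simp
  -- A side: the fold over the keys computes a key of minimal / maximal value
  set st := (k0 :: rest).foldl (fun (s : String × String) key =>
      (if v key < v s.1 then key else s.1,
       if v key > v s.2 then key else s.2)) (k0, k0) with hst
  obtain ⟨hfmin, hfmax⟩ := fold_minmax v (k0 :: rest) k0 k0
  have hmin' : List.foldl min (v k0) (v k0 :: rest.map v) = List.foldl min (v k0) (rest.map v) := by
    rw [List.foldl_cons, min_self]
  have hmax' : List.foldl max (v k0) (v k0 :: rest.map v) = List.foldl max (v k0) (rest.map v) := by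
    rw [List.foldl_cons, max_self]
  rw [List.map_cons, hmin'] at hfmin
  rw [List.map_cons, hmax'] at hfmax
  have hmmem : v st.1 ∈ (PySem.Dict.mk counts).values := by
    rw [hvals, hfmin]
    rcases PySem.List.foldl_min_mem (rest.map v) (v k0) with h | h
    · rw [h]; exact List.mem_cons_self
    · exact List.mem_cons_of_mem _ h
  have hmle : ∀ y ∈ (PySem.Dict.mk counts).values, v st.1 ≤ y := by
    intro y hy
    rw [hvals] at hy
    rw [hfmin]
    rcases List.mem_cons.mp hy with h | h
    · rw [h]; exact (PySem.List.foldl_min_le (rest.map v) (v k0)).1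
    · exact (PySem.List.foldl_min_le (rest.map v) (v k0)).2 y h
  have hMmem : v st.2 ∈ (PySem.Dict.mk counts).values := by
    rw [hvals, hfmax]
    rcases PySem.List.foldl_max_mem (rest.map v) (v k0) with h | h
    · rw [h]; exact List.mem_cons_self
    · exact List.mem_cons_of_mem _ h
  have hMge : ∀ y ∈ (PySem.Dict.mk counts).values, y ≤ v st.2 := by
    intro y hy
    rw [hvals] at hy
    rw [hfmax]
    rcases List.mem_cons.mp hy with h | h
    · rw [h]; exact (PySem.List.le_foldl_max (rest.map v) (v k0)).1
    · exact (PySem.List.le_foldl_max (rest.map v) (v k0)).2 y h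
  -- B side: head / last of the sorted value list are the min / max of the values
  set s := PySem.List.sorted (PySem.Dict.mk counts).values (fun x => x) with hs
  have hperm : s.Perm (PySem.Dict.mk counts).values :=
    PySem.List.sorted_perm (PySem.Dict.mk counts).values (fun x => x) false
  have hsne : s ≠ [] := by
    intro h0
    apply hvne
    have := hperm.length_eq
    rw [h0] at this
    exact List.eq_nil_of_length_eq_zero this.symm
  have hheadmem : s.head hsne ∈ (PySem.Dict.mk counts).values :=
    hperm.mem_iff.mp (List.head_mem hsne)
  have hlastmem : s.getLast hsne ∈ (PySem.Dict.mk counts).values :=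
    hperm.mem_iff.mp (List.getLast_mem hsne)
  have hheadle : ∀ y ∈ (PySem.Dict.mk counts).values, s.head hsne ≤ y := by
    intro y hy
    obtain ⟨i, hi, rfl⟩ := List.mem_iff_getElem.mp (hperm.mem_iff.mpr hy)
    rw [List.head_eq_getElem]
    exact PySem.List.sorted_id_getElem_mono _ (Nat.zero_le i) (by rw [← hs]; omega)
  have hlastge : ∀ y ∈ (PySem.Dict.mk counts).values, y ≤ s.getLast hsne := by
    intro y hy
    obtain ⟨i, hi, rfl⟩ := List.mem_iff_getElem.mp (hperm.mem_iff.mpr hy)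
    rw [List.getLast_eq_getElem]
    exact PySem.List.sorted_id_getElem_mono _ (by omega) (by rw [← hs]; omega)
  have hmin_eq : v st.1 = s.head hsne :=
    le_antisymm (hmle _ hheadmem) (hheadle _ hmmem)
  have hmax_eq : v st.2 = s.getLast hsne :=
    le_antisymm (hlastge _ hMmem) (hMge _ hlastmem)
  -- put the two ports in these terms
  unfold calculate_difference calculate_difference_alt
  simp only [← hs]
  rw [pyGet_neg_one s hsne, pyGet_zero s hsne, hk]
  show v st.2 - v st.1 = s.getLast hsne - s.head hsne
  rw [hmin_eq, hmax_eq]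

-- ===== VERDICT (by name: the statement is the Claim_ definition above) =====
theorem calculate_difference_spec : Claim_equal_calculate_difference := by
  intro counts _ hpre
  exact main_eq counts hpre.1 hpre.2
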